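-- pv_equiv track=rewrite | github.com/Jonater/Runtime | runtime.py | lpaln
-- ===== SOURCE A (Python) =====
-- def lpaln(zas, thresLow, thresHigh):
-- 	s = False
-- 	for x in zas:
-- 		if x < thresLow:
-- 			s = True
-- 		if s and x > thresHigh:
-- 			return True
-- 	return False
-- ===== SOURCE B (Python) =====
-- def lpaln(zas, thresLow, thresHigh):
--     # Reverse pass with a running suffix maximum: the crossing pattern exists
--     # iff some element x < thresLow has max(zas[i:]) > thresHigh (x included).
--     best = None
--     for x in reversed(zas):
--         best = x if best is None or x > best else best
--         if x < thresLow and best > thresHigh: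
--             return True
--     return False
-- ===== Notes on version B (the rewrite author's own statement) =====
-- stated objective: alternative
-- what changed: Traverses the list in reverse maintaining a running suffix maximum, answering True when an element below thresLow has a suffix maximum above thresHigh, instead of A's forward pass with a latched boolean flag.
import Mathlib
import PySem

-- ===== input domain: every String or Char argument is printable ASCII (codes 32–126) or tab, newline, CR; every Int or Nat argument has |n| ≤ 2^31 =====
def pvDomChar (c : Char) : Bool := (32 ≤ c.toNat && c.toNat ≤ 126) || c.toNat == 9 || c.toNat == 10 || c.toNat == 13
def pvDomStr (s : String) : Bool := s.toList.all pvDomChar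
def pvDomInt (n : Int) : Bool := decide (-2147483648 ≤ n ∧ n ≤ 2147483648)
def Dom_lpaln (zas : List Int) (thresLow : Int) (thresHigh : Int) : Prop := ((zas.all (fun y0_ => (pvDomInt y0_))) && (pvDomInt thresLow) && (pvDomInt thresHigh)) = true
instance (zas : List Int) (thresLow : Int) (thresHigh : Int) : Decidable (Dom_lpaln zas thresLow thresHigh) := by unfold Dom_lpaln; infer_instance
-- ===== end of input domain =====

-- B replaces A's forward pass with a latched boolean by a reverse traversal
-- maintaining a running suffix maximum; same O(n) cost, different state and order.

-- ===== PORT A =====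
-- the for-loop with latch s and early return, as structural recursion over zas
def lpalnGo (thresLow : Int) (thresHigh : Int) : List Int → Bool → Bool
  | [], _ => false
  | x :: xs, s =>
      let s' := if x < thresLow then true else s
      if s' && decide (x > thresHigh) then true else lpalnGo thresLow thresHigh xs s'

def lpaln (zas : List Int) (thresLow : Int) (thresHigh : Int) : Bool :=
  lpalnGo thresLow thresHigh zas false

-- ===== PORT B =====
-- the Python conditional expression 'x if best is None or x > best else best'
def maxStep (best : Option Int) (x : Int) : Int :=
  match best with | none => x | some m => if x > m then x else m

-- the reversed for-loop with running suffix maximum 'best' (None initially)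
def lpalnAltGo (thresLow : Int) (thresHigh : Int) : List Int → Option Int → Bool
  | [], _ => false
  | x :: xs, best =>
      if decide (x < thresLow) && decide (maxStep best x > thresHigh) then true
      else lpalnAltGo thresLow thresHigh xs (some (maxStep best x))

def lpaln_alt (zas : List Int) (thresLow : Int) (thresHigh : Int) : Bool :=
  lpalnAltGo thresLow thresHigh zas.reverse none

-- ===== PRECONDITION & SPEC =====
def Spec_lpaln (zas : List Int) (thresLow : Int) (thresHigh : Int) (out : Bool) : Prop := out = lpaln_alt zas thresLow thresHigh
instance (zas : List Int) (thresLow : Int) (thresHigh : Int) (out : Bool) : Decidable (Spec_lpaln zas thresLow thresHigh out) := by unfold Spec_lpaln; infer_instance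

-- ===== CLAIM (what is proved, stated in full; the proofs are below) =====
def Claim_equal_lpaln : Prop := ∀ (zas : List Int) (thresLow : Int) (thresHigh : Int), Dom_lpaln zas thresLow thresHigh → Spec_lpaln zas thresLow thresHigh (lpaln zas thresLow thresHigh)

-- ===== LEMMAS AND PROOFS =====

-- common normal form: drop the prefix that never dipped below thresLow, then scan for > thresHigh
def dwForm (zas : List Int) (thresLow : Int) (thresHigh : Int) : Bool :=
  (zas.dropWhile (fun x => decide (x ≥ thresLow))).any (fun x => decide (x > thresHigh))

-- A's loop invariant: once the latch is set, A just scans for x > thresHigh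
theorem lpalnGo_eq (thresLow thresHigh : Int) (xs : List Int) (s : Bool) :
    lpalnGo thresLow thresHigh xs s =
      if s then xs.any (fun x => decide (x > thresHigh)) else dwForm xs thresLow thresHigh := by
  induction xs generalizing s with
  | nil => simp [lpalnGo, dwForm]
  | cons x xs ih =>
    simp only [lpalnGo, ih, dwForm, List.dropWhile]
    by_cases hs : s
    · by_cases hlt : x < thresLow <;> by_cases hgt : x > thresHigh <;>
        simp [hs, hlt, hgt, List.any_cons]
    · by_cases hlt : x < thresLow
      · have : ¬ (x ≥ thresLow) := by omega
        by_cases hgt : x > thresHigh <;> simp [hs, hlt, hgt, this, List.any_cons]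
      · have : x ≥ thresLow := by omega
        simp [hs, hlt, this]

def runMax (b : Option Int) (l : List Int) : Option Int :=
  l.foldl (fun b x => some (maxStep b x)) b

theorem runMax_some (l : List Int) (b : Int) :
    runMax (some b) l = some (l.foldl (fun m x => if x > m then x else m) b) := by
  induction l generalizing b with
  | nil => rfl
  | cons y l ih => simp [runMax, maxStep, List.foldl] at ih ⊢; exact ih _

theorem foldl_max_gt (l : List Int) (b th : Int) :
    decide (l.foldl (fun m x => if x > m then x else m) b > th) =
      (decide (b > th) || l.any (fun x => decide (x > th))) := by
  induction l generalizing b with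
  | nil => simp
  | cons y l ih =>
    simp only [List.foldl, List.any_cons]
    refine (ih (if y > b then y else b)).trans ?_
    by_cases h : y > b <;> by_cases hb : b > th <;> by_cases hy : y > th <;>
      simp [h, hb, hy] <;> omega

theorem maxStep_runMax_gt (l : List Int) (x th : Int) :
    decide (maxStep (runMax none l) x > th) =
      (decide (x > th) || l.any (fun z => decide (z > th))) := by
  cases l with
  | nil => simp [runMax, maxStep]
  | cons y l =>
    have h1 : runMax (none : Option Int) (y :: l) = runMax (some y) l := by
      simp [runMax, maxStep, List.foldl]
    rw [h1, runMax_some]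
    simp only [maxStep, List.any_cons]
    rw [← foldl_max_gt l y th]
    by_cases hx : x > l.foldl (fun m x => if x > m then x else m) y <;>
      by_cases hxt : x > th <;>
      by_cases hFt : l.foldl (fun m x => if x > m then x else m) y > th <;>
      simp [hx, hxt, hFt] <;> omega

-- appending one element at the end of B's loop: process l, then test x against the final max
theorem lpalnAltGo_append (thresLow thresHigh : Int) (l : List Int) (x : Int) (best : Option Int) :
    lpalnAltGo thresLow thresHigh (l ++ [x]) best =
      (lpalnAltGo thresLow thresHigh l best ||
        (decide (x < thresLow) && decide (maxStep (runMax best l) x > thresHigh))) := by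
  induction l generalizing best with
  | nil => simp [lpalnAltGo, runMax]
  | cons y l ih =>
    simp only [List.cons_append, lpalnAltGo]
    rw [show runMax best (y :: l) = runMax (some (maxStep best y)) l from by
      simp [runMax, List.foldl]]
    by_cases h : (decide (y < thresLow) && decide (maxStep best y > thresHigh)) = true
    · simp [h]
    · rw [if_neg h, if_neg h, ih]

-- any over the dropWhile suffix implies any over the whole list
theorem any_dropWhile_le (l : List Int) (p q : Int → Bool) :
    (l.dropWhile p).any q = true → l.any q = true := by
  intro h
  rcases List.any_eq_true.mp h with ⟨x, hx, hq⟩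
  exact List.any_eq_true.mpr ⟨x, (List.dropWhile_sublist _).subset hx, hq⟩

-- main B characterisation: B computes the dropWhile normal form too
theorem lpaln_alt_eq_dwForm (zas : List Int) (thresLow thresHigh : Int) :
    lpaln_alt zas thresLow thresHigh = dwForm zas thresLow thresHigh := by
  induction zas with
  | nil => rfl
  | cons x xs ih =>
    unfold lpaln_alt at ih ⊢
    rw [show (x :: xs).reverse = xs.reverse ++ [x] from by simp,
      lpalnAltGo_append, maxStep_runMax_gt, List.any_reverse, ih]
    by_cases hlt : x < thresLow
    · have hge : ¬ (x ≥ thresLow) := by omega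
      have hdw : dwForm (x :: xs) thresLow thresHigh =
          (decide (x > thresHigh) || xs.any (fun z => decide (z > thresHigh))) := by
        simp [dwForm, List.dropWhile, hge]
      rw [hdw]
      simp only [hlt, decide_true, Bool.true_and]
      by_cases hany : xs.any (fun z => decide (z > thresHigh)) = true
      · simp [hany]
      · have hfalse : dwForm xs thresLow thresHigh = false := by
          rcases Bool.eq_false_or_eq_true (dwForm xs thresLow thresHigh) with h | h
          · exact absurd (any_dropWhile_le _ _ _ (by unfold dwForm at h; exact h)) hany
          · exact h
        simp [hfalse]
    · have hge : x ≥ thresLow := by omega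
      simp [dwForm, List.dropWhile, hge, hlt]

-- ===== VERDICT (by name: the statement is the Claim_ definition above) =====
theorem lpaln_spec : Claim_equal_lpaln := by
  intro zas tl th _
  unfold Spec_lpaln lpaln
  rw [lpaln_alt_eq_dwForm, lpalnGo_eq]
  simp
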